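-- pv_equiv track=rewrite | github.com/csh3l3-20172018-ade/tebak-jenis-kelamin-berdasarkan-nama-ariijbnaufal | MALIN_Tugas1_AriijBangkitNaufal_1301154666.py | lelaki
-- ===== SOURCE A (Python) =====
-- def lelaki(nama):
--     poin = 0
--     for i in range(len(nama)):
--         if nama[i] == 'b':
--             poin = poin + 1
--         elif nama[i] == 'B':
--             poin = poin + 1
--         elif nama[i] == 'd':
--             poin = poin + 1
--         elif nama[i] == 'D':
--             poin = poin + 1
--         elif nama[i] == 'o':
--             poin = poin + 1
--         elif nama[i] == 'O':
--             poin = poin + 1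
--         elif nama[i] == ' ':
--             break
--     return poin
-- ===== SOURCE B (Python) =====
-- def lelaki(nama):
--     cut = nama.find(' ')
--     kepala = nama if cut == -1 else nama[:cut]
--     return sum(kepala.count(huruf) for huruf in 'bBdDoO')
-- ===== Notes on version B (the rewrite author's own statement) =====
-- stated objective: faster
-- what changed: Instead of A's single per-character pass with a six-way elif chain and a break, B cuts the name at the first space (find + slice) and then makes six separate str.count passes over that prefix, one per target letter, summing the six counts.
import Mathlib
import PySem

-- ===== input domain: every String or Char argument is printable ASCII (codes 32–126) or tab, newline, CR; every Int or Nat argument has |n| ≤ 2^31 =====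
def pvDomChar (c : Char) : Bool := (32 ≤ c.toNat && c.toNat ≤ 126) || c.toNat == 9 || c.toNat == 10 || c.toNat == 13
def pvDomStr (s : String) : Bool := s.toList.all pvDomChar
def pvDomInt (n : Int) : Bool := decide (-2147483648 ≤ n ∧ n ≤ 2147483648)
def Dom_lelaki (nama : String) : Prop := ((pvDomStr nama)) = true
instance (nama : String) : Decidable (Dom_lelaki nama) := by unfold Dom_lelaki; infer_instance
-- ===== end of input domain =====

-- B cuts the name at the first space (find + slice) and then sums six separate str.count passes,
-- one per target letter, instead of A's single per-character six-way-branch loop with break.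

-- ===== PORT A =====
-- the for-loop with break, as structural recursion over the characters with the accumulator poin
def lelakiGo : List Char → Int → Int
  | [], poin => poin
  | c :: rest, poin =>
    if c = 'b' then lelakiGo rest (poin + 1)
    else if c = 'B' then lelakiGo rest (poin + 1)
    else if c = 'd' then lelakiGo rest (poin + 1)
    else if c = 'D' then lelakiGo rest (poin + 1)
    else if c = 'o' then lelakiGo rest (poin + 1)
    else if c = 'O' then lelakiGo rest (poin + 1)
    else if c = ' ' then poin
    else lelakiGo rest poin

def lelaki (nama : String) : Int := lelakiGo nama.toList 0

-- ===== PORT B =====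
def lelaki_alt (nama : String) : Int :=
  let cut := PySem.Str.find nama " "
  let kepala := if cut == -1 then nama else PySem.Str.slice nama none (some cut)
  "bBdDoO".toList.foldl
    (fun acc huruf => acc + (PySem.Str.count kepala (String.ofList [huruf]) : Int)) 0

-- ===== PRECONDITION & SPEC =====
def Spec_lelaki (nama : String) (out : Int) : Prop := out = lelaki_alt nama
instance (nama : String) (out : Int) : Decidable (Spec_lelaki nama out) := by unfold Spec_lelaki; infer_instance

-- ===== CLAIM (what is proved, stated in full; the proofs are below) =====
def Claim_equal_lelaki : Prop := ∀ (nama : String), Dom_lelaki nama → Spec_lelaki nama (lelaki nama)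

-- ===== LEMMAS AND PROOFS =====

def lelakiPred (c : Char) : Bool := c = 'b' ∨ c = 'B' ∨ c = 'd' ∨ c = 'D' ∨ c = 'o' ∨ c = 'O'

def notSpace (c : Char) : Bool := !(c == ' ')

theorem lelakiGo_eq (l : List Char) (p : Int) :
    lelakiGo l p = p + ((l.takeWhile notSpace).countP lelakiPred : Int) := by
  induction l generalizing p with
  | nil => simp [lelakiGo]
  | cons c rest ih =>
    by_cases h : c = ' '
    · subst h
      simp [lelakiGo, List.takeWhile, notSpace]
    · have hx : notSpace c = true := by simp [notSpace, h]
      simp only [List.takeWhile, hx]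
      by_cases hb : lelakiPred c
      · rcases (by simpa [lelakiPred, decide_eq_true_iff] using hb :
            c = 'b' ∨ c = 'B' ∨ c = 'd' ∨ c = 'D' ∨ c = 'o' ∨ c = 'O') with h1|h1|h1|h1|h1|h1 <;>
          subst h1 <;>
          simp [lelakiGo, ih, lelakiPred] <;> ring
      · have h1 : c ≠ 'b' := by rintro rfl; exact hb (by simp [lelakiPred])
        have h2 : c ≠ 'B' := by rintro rfl; exact hb (by simp [lelakiPred])
        have h3 : c ≠ 'd' := by rintro rfl; exact hb (by simp [lelakiPred])
        have h4 : c ≠ 'D' := by rintro rfl; exact hb (by simp [lelakiPred])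
        have h5 : c ≠ 'o' := by rintro rfl; exact hb (by simp [lelakiPred])
        have h6 : c ≠ 'O' := by rintro rfl; exact hb (by simp [lelakiPred])
        simp [lelakiGo, h1, h2, h3, h4, h5, h6, h, ih, hb]

-- str.count with a single-character needle is List.count (fueled recursion, fuel ≥ length)
theorem countGo_singleton (h : Char) (l : List Char) (fuel acc : Nat)
    (hf : l.length ≤ fuel) :
    PySem.Chars.count.go [h] fuel l acc = acc + l.count h := by
  induction l generalizing fuel acc with
  | nil => cases fuel <;> simp [PySem.Chars.count.go]
  | cons c rest ih =>
    cases fuel with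
    | zero => simp at hf
    | succ fuel =>
      have hf' : rest.length ≤ fuel := by simpa using hf
      by_cases hc : c = h
      · subst hc
        have hpre : [c].isPrefixOf (c :: rest) = true := by simp [List.isPrefixOf]
        simp only [PySem.Chars.count.go, hpre, if_true, List.length_cons, List.length_nil,
          List.drop_succ_cons, List.drop_zero]
        rw [ih fuel (acc + 1) hf']
        simp
        omega
      · have hpre : [h].isPrefixOf (c :: rest) = false := by
          simp [List.isPrefixOf]
          exact fun hh => (hc hh.symm).elim
        simp only [PySem.Chars.count.go, hpre, Bool.false_eq_true, if_false]
        rw [ih fuel acc hf']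
        simp [hc]

theorem count_singleton (h : Char) (l : List Char) :
    PySem.Chars.count l [h] = l.count h := by
  unfold PySem.Chars.count
  simp only [List.isEmpty_cons, Bool.false_eq_true, if_false]
  simpa using countGo_singleton h l l.length 0 le_rfl

-- a 0/1 indicator summed over the six distinct letters is the membership predicate
theorem sum_indicator (c : Char) :
    ((['b','B','d','D','o','O'].map (fun h => if c = h then (1 : Int) else 0)).sum)
      = if lelakiPred c then 1 else 0 := by
  by_cases hb : lelakiPred c
  · rcases (by simpa [lelakiPred, decide_eq_true_iff] using hb :
        c = 'b' ∨ c = 'B' ∨ c = 'd' ∨ c = 'D' ∨ c = 'o' ∨ c = 'O') with h1|h1|h1|h1|h1|h1 <;>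
      subst h1 <;> simp [lelakiPred]
  · have h1 : c ≠ 'b' := by rintro rfl; exact hb (by simp [lelakiPred])
    have h2 : c ≠ 'B' := by rintro rfl; exact hb (by simp [lelakiPred])
    have h3 : c ≠ 'd' := by rintro rfl; exact hb (by simp [lelakiPred])
    have h4 : c ≠ 'D' := by rintro rfl; exact hb (by simp [lelakiPred])
    have h5 : c ≠ 'o' := by rintro rfl; exact hb (by simp [lelakiPred])
    have h6 : c ≠ 'O' := by rintro rfl; exact hb (by simp [lelakiPred])
    simp [h1, h2, h3, h4, h5, h6, hb]

-- summing the six per-letter counts equals one countP over the list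
theorem sum_counts (l : List Char) :
    ((['b','B','d','D','o','O'].map (fun h => (l.count h : Int))).sum)
      = (l.countP lelakiPred : Int) := by
  induction l with
  | nil => simp
  | cons c rest ih =>
    have hcnt : ∀ h : Char, ((c :: rest).count h : Int)
        = (rest.count h : Int) + (if c = h then 1 else 0) := by
      intro h
      by_cases hc : c = h <;> simp [hc]
    have hmap : (['b','B','d','D','o','O'].map (fun h => ((c :: rest).count h : Int)))
        = (['b','B','d','D','o','O'].map
            (fun h => (rest.count h : Int) + (if c = h then 1 else 0))) := by
      simp only [hcnt]
    rw [hmap, List.sum_map_add, ih, sum_indicator]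
    by_cases hb : lelakiPred c <;> simp [hb]

theorem take_eq_takeWhile (l : List Char) (j : Nat)
    (hj : j ≤ l.length)
    (hlt : ∀ i, (hi : i < j) → l[i]'(by omega) ≠ ' ')
    (hstop : j = l.length ∨ (∀ h : j < l.length, l[j]'h = ' ')) :
    l.take j = l.takeWhile notSpace := by
  induction l generalizing j with
  | nil => simp
  | cons c rest ih =>
    cases j with
    | zero =>
      rcases hstop with h | h
      · simp at h
      · have hc : c = ' ' := h (by simp)
        simp [List.takeWhile, notSpace, hc]
    | succ j =>
      have hc : c ≠ ' ' := hlt 0 (by omega)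
      have hx : notSpace c = true := by simp [notSpace, hc]
      simp only [List.take, List.takeWhile, hx, List.cons.injEq, true_and]
      refine ih j (by simpa using hj) (fun i hi => hlt (i+1) (by omega)) ?_
      rcases hstop with h | h
      · left; simp at h; omega
      · right; intro h'; exact h (by simpa using Nat.succ_lt_succ h')

theorem prefix_eq (nama : String) :
    (if PySem.Str.find nama " " == -1 then nama
     else PySem.Str.slice nama none (some (PySem.Str.find nama " "))).toList
    = nama.toList.takeWhile notSpace := by
  have hfind : PySem.Str.find nama " " = PySem.Chars.find nama.toList [' '] :=
    PySem.Str.find_eq nama " "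
  by_cases h : PySem.Chars.find nama.toList [' '] = -1
  · have hni : ¬ [' '] <:+: nama.toList :=
      (PySem.Chars.find_eq_neg_one_iff nama.toList [' ']).mp h
    have hmem : ' ' ∉ nama.toList := by
      intro hm
      rcases List.mem_iff_append.mp hm with ⟨s, t, hst⟩
      exact hni ⟨s, t, by rw [hst]; simp⟩
    have hself : nama.toList.takeWhile notSpace = nama.toList := by
      rw [List.takeWhile_eq_self_iff]
      intro x hx
      simp [notSpace]
      rintro rfl; exact hmem hx
    simp [h, hself]
  · have hge : 0 ≤ PySem.Chars.find nama.toList [' '] := by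
      have := PySem.Chars.neg_one_le_find nama.toList [' ']
      omega
    obtain ⟨hpre, hmin⟩ := PySem.Chars.find_spec (s := nama.toList) (sub := [' ']) hge
    have hle := PySem.Chars.find_le_length nama.toList [' ']
    have hjle : (PySem.Chars.find nama.toList [' ']).toNat ≤ nama.toList.length := by omega
    have hif : (PySem.Str.find nama " " == -1) = false := by rw [hfind]; simp; omega
    rw [hif]
    simp only [Bool.false_eq_true, if_false]
    rw [PySem.Str.toList_slice, PySem.Chars.slice_eq_listSlice, hfind,
      PySem.List.slice_to _ hge]
    apply take_eq_takeWhile _ _ hjle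
    · intro i hi hc
      apply hmin i hi
      have hdrop : nama.toList.drop i = ' ' :: nama.toList.drop (i+1) := by
        rw [List.drop_eq_getElem_cons (by omega), hc]
      rw [hdrop]
      exact ⟨_, rfl⟩
    · right
      intro h'
      rcases hpre with ⟨t, ht⟩
      have hdrop := List.drop_eq_getElem_cons (l := nama.toList)
        (i := (PySem.Chars.find nama.toList [' ']).toNat) h'
      rw [hdrop] at ht
      exact (List.cons_eq_cons.mp ht).1.symm

-- ===== VERDICT (by name: the statement is the Claim_ definition above) =====
theorem lelaki_spec : Claim_equal_lelaki := by
  intro nama _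
  unfold Spec_lelaki lelaki lelaki_alt
  rw [lelakiGo_eq]
  simp only
  rw [PySem.List.foldl_add]
  have hk : ∀ h : Char,
      PySem.Str.count
        (if (PySem.Str.find nama " " == -1) = true then nama
         else PySem.Str.slice nama none (some (PySem.Str.find nama " "))) (String.ofList [h])
      = (nama.toList.takeWhile notSpace).count h := by
    intro h
    rw [PySem.Str.count_eq]
    rw [prefix_eq nama]
    have hm : (String.ofList [h]).toList = [h] := Eq.symm (String.ofList_eq.mp rfl)
    rw [hm]
    exact count_singleton h (nama.toList.takeWhile notSpace)
  simp only [hk]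
  rw [show "bBdDoO".toList = ['b','B','d','D','o','O'] from rfl]
  rw [sum_counts]
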